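-- pv_equiv track=rewrite | github.com/docbill/sieve-goldbach | bin/summarizelambdaboundcert.py | nearest_lambda_with_bracket
-- ===== SOURCE A (Python) =====
-- def nearest_lambda_with_bracket(pairs, target_n):
--     below = None
--     above = None
--     for n_val, lambda_val in pairs:
--         if n_val <= target_n:
--             if below is None or n_val > below[0]:
--                 below = (n_val, lambda_val)
--         if n_val >= target_n:
--             if above is None or n_val < above[0]:
--                 above = (n_val, lambda_val)
--     if below is None or above is None:
--         return None
--     if abs(target_n - below[0]) <= abs(above[0] - target_n):
--         return below[1]
--     return above[1]
-- ===== SOURCE B (Python) =====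
-- def nearest_lambda_with_bracket(pairs, target_n):
--     pairs = list(pairs)
--     if all(n < target_n for n, _ in pairs) or all(n > target_n for n, _ in pairs):
--         return None
--     best = min(pairs, key=lambda p: (abs(p[0] - target_n), 0 if p[0] <= target_n else 1))
--     return best[1]
-- ===== Notes on version B (the rewrite author's own statement) =====
-- stated objective: alternative
-- what changed: Replaces A's bracketing (best-below and best-above accumulators then a final distance comparison) with a single global minimum over all pairs under the composite key (abs(n - target), below-side flag), guarded by two all() existence checks; no below/above bracket is ever computed.
import Mathlib
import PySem

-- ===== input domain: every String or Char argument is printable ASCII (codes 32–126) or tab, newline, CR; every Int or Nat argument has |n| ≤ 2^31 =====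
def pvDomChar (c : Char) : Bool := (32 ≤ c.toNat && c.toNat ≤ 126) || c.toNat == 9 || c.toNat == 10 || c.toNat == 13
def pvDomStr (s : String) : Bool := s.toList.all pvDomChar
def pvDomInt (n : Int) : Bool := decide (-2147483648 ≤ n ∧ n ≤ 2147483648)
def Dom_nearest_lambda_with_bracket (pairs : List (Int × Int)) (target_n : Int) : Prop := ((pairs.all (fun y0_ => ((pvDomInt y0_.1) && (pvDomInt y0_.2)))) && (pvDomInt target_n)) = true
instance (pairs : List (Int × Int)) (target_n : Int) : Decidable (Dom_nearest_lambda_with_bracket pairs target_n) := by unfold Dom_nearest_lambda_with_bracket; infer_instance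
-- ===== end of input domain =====

-- ===== PORT A =====
-- B replaces A's below/above bracketing with one global min over a composite key (alternative decomposition, same O(n)).
def nearest_lambda_with_bracket (pairs : List (Int × Int)) (target_n : Int) : Option Int :=
  let st := pairs.foldl
    (fun (st : Option (Int × Int) × Option (Int × Int)) p =>
      let below :=
        if p.1 ≤ target_n then
          match st.1 with
          | none => some p
          | some b => if p.1 > b.1 then some p else some b
        else st.1
      let above :=
        if p.1 ≥ target_n then
          match st.2 with
          | none => some p
          | some a => if p.1 < a.1 then some p else some a
        else st.2
      (below, above))
    (none, none)
  match st.1, st.2 with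
  | none, _ => none
  | _, none => none
  | some b, some a =>
      if |target_n - b.1| ≤ |a.1 - target_n| then some b.2 else some a.2

-- ===== PORT B =====
def nearest_lambda_with_bracket_alt (pairs : List (Int × Int)) (target_n : Int) : Option Int :=
  if pairs.all (fun p => p.1 < target_n) || pairs.all (fun p => target_n < p.1) then
    none
  else
    match PySem.List.min2? pairs (fun p => |p.1 - target_n|)
        (fun p => if p.1 ≤ target_n then (0 : Int) else 1) with
    | some best => some best.2
    | none => none

-- ===== PRECONDITION & SPEC =====
def Spec_nearest_lambda_with_bracket (pairs : List (Int × Int)) (target_n : Int) (out : Option Int) : Prop := out = nearest_lambda_with_bracket_alt pairs target_n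
instance (pairs : List (Int × Int)) (target_n : Int) (out : Option Int) : Decidable (Spec_nearest_lambda_with_bracket pairs target_n out) := by unfold Spec_nearest_lambda_with_bracket; infer_instance

-- ===== CLAIM (what is proved, stated in full; the proofs are below) =====
def Claim_equal_nearest_lambda_with_bracket : Prop := ∀ (pairs : List (Int × Int)) (target_n : Int), Dom_nearest_lambda_with_bracket pairs target_n → Spec_nearest_lambda_with_bracket pairs target_n (nearest_lambda_with_bracket pairs target_n)

-- ===== LEMMAS AND PROOFS =====

-- 'link' combines A's two accumulators into the element B's running minimum holds.
def nlLink (t : Int) (b a : Option (Int × Int)) : Option (Int × Int) :=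
  match b, a with
  | none, none => none
  | some bp, none => some bp
  | none, some ap => some ap
  | some bp, some ap => if |t - bp.1| ≤ |ap.1 - t| then some bp else some ap

-- the invariant A's loop state satisfies
def nlInv (t : Int) (b a : Option (Int × Int)) : Prop :=
  (∀ bp, b = some bp → bp.1 ≤ t) ∧ (∀ ap, a = some ap → t ≤ ap.1) ∧
  (∀ bp, b = some bp → bp.1 = t → a = some bp) ∧
  (∀ ap, a = some ap → ap.1 = t → b = some ap)

-- A's loop step on the combined state
def nlStepA (t : Int) (st : Option (Int × Int) × Option (Int × Int)) (p : Int × Int) :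
    Option (Int × Int) × Option (Int × Int) :=
  (if p.1 ≤ t then
      match st.1 with
      | none => some p
      | some b => if p.1 > b.1 then some p else some b
    else st.1,
   if p.1 ≥ t then
      match st.2 with
      | none => some p
      | some a => if p.1 < a.1 then some p else some a
    else st.2)

-- B's loop step (the fold inside min2? with B's two keys)
def nlStepB (t : Int) (acc : Option (Int × Int)) (p : Int × Int) : Option (Int × Int) :=
  match acc with
  | none => some p
  | some m =>
      if (decide (|p.1 - t| < |m.1 - t|) ||
          !decide (|m.1 - t| < |p.1 - t|) &&
          decide ((if p.1 ≤ t then (0 : Int) else 1) < (if m.1 ≤ t then (0 : Int) else 1))) = true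
      then some p else some m

theorem nlabs (x : Int) : |x| = if 0 ≤ x then x else -x := by
  split_ifs with h
  · exact abs_of_nonneg h
  · exact abs_of_neg (by omega)

theorem nl_inv_step (t : Int) (b a : Option (Int × Int)) (p : Int × Int)
    (h : nlInv t b a) : nlInv t (nlStepA t (b, a) p).1 (nlStepA t (b, a) p).2 := by
  obtain ⟨h1, h2, h3, h4⟩ := h
  rcases b with _ | bp <;> rcases a with _ | ap
  · clear h1 h2 h3 h4
    refine ⟨?_, ?_, ?_, ?_⟩ <;> intro q hq <;> (try intro hqt) <;>
      simp only [nlStepA, ge_iff_le] at hq ⊢ <;>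
      split_ifs at hq ⊢ <;>
        first | rfl | omega | (simp_all <;> omega) | simp_all | (exfalso; omega)
  · have hap : t < ap.1 := by
      have h := h2 ap rfl
      rcases lt_or_eq_of_le h with h' | h'; · exact h'
      · exact absurd (h4 ap rfl h'.symm) (by simp)
    clear h1 h2 h3 h4
    refine ⟨?_, ?_, ?_, ?_⟩ <;> intro q hq <;> (try intro hqt) <;>
      simp only [nlStepA, ge_iff_le] at hq ⊢ <;>
      split_ifs at hq ⊢ <;>
        first | rfl | omega | (simp_all <;> omega) | simp_all | (exfalso; omega)
  · have hbp : bp.1 < t := by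
      have h := h1 bp rfl
      rcases lt_or_eq_of_le h with h' | h'; · exact h'
      · exact absurd (h3 bp rfl h') (by simp)
    clear h1 h2 h3 h4
    refine ⟨?_, ?_, ?_, ?_⟩ <;> intro q hq <;> (try intro hqt) <;>
      simp only [nlStepA, ge_iff_le] at hq ⊢ <;>
      split_ifs at hq ⊢ <;>
        first | rfl | omega | (simp_all <;> omega) | simp_all | (exfalso; omega)
  · have hbp : bp.1 ≤ t := h1 bp rfl
    have hap : t ≤ ap.1 := h2 ap rfl
    by_cases hbt' : bp.1 = t
    · have he : ap = bp := Option.some.inj (h3 bp rfl hbt')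
      subst he
      clear h1 h2 h3 h4
      refine ⟨?_, ?_, ?_, ?_⟩ <;> intro q hq <;> (try intro hqt) <;>
        simp only [nlStepA, ge_iff_le] at hq ⊢ <;>
        split_ifs at hq ⊢ <;>
        first | rfl | omega | (simp_all <;> omega) | simp_all | (exfalso; omega)
    · by_cases hat' : ap.1 = t
      · have he : bp = ap := Option.some.inj (h4 ap rfl hat')
        exact absurd (he ▸ hat') hbt'
      · have hbp' : bp.1 < t := lt_of_le_of_ne hbp hbt'
        have hap' : t < ap.1 := lt_of_le_of_ne hap (fun h => hat' h.symm)
        clear h1 h2 h3 h4 hbp hap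
        refine ⟨?_, ?_, ?_, ?_⟩ <;> intro q hq <;> (try intro hqt) <;>
          simp only [nlStepA, ge_iff_le] at hq ⊢ <;>
          split_ifs at hq ⊢ <;>
        first | rfl | omega | (simp_all <;> omega) | simp_all | (exfalso; omega)

set_option maxHeartbeats 2000000 in
theorem nl_link_step (t : Int) (b a : Option (Int × Int)) (p : Int × Int)
    (h : nlInv t b a) :
    nlStepB t (nlLink t b a) p = nlLink t (nlStepA t (b, a) p).1 (nlStepA t (b, a) p).2 := by
  obtain ⟨h1, h2, h3, h4⟩ := h
  rcases b with _ | bp <;> rcases a with _ | ap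
  · clear h1 h2 h3 h4
    simp only [nlStepA, nlStepB, nlLink, ge_iff_le, nlabs]
    split_ifs <;> simp_all <;> omega
  · have hap : t < ap.1 := by
      have h := h2 ap rfl
      rcases lt_or_eq_of_le h with h' | h'; · exact h'
      · exact absurd (h4 ap rfl h'.symm) (by simp)
    clear h1 h2 h3 h4
    simp only [nlStepA, nlStepB, nlLink, ge_iff_le, nlabs]
    split_ifs <;> simp_all <;> omega
  · have hbp : bp.1 < t := by
      have h := h1 bp rfl
      rcases lt_or_eq_of_le h with h' | h'; · exact h'
      · exact absurd (h3 bp rfl h') (by simp)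
    clear h1 h2 h3 h4
    simp only [nlStepA, nlStepB, nlLink, ge_iff_le, nlabs]
    split_ifs <;> simp_all <;> omega
  · have hbp : bp.1 ≤ t := h1 bp rfl
    have hap : t ≤ ap.1 := h2 ap rfl
    have hbt : bp.1 = t → ap = bp := fun he => Option.some.inj (h3 bp rfl he)
    have hat : ap.1 = t → bp = ap := fun he => Option.some.inj (h4 ap rfl he)
    have e1 : |t - bp.1| = t - bp.1 := abs_of_nonneg (by omega)
    have e2 : |ap.1 - t| = ap.1 - t := abs_of_nonneg (by omega)
    clear h1 h2 h3 h4
    by_cases hp : p.1 ≤ t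
    · have ep : |p.1 - t| = t - p.1 := by rw [abs_of_nonpos (by omega)]; ring
      have ep' : |t - p.1| = t - p.1 := abs_of_nonneg (by omega)
      simp only [nlStepA, nlStepB, nlLink, ge_iff_le, e1, e2, ep, ep']
      split_ifs <;>
        first
          | rfl | omega
          | (have h := hbt (by omega); subst h; simp_all <;> omega)
          | (have h := hat (by omega); subst h; simp_all <;> omega)
          | (intros; simp only [nlabs] at *; split_ifs at * <;> first | rfl | omega | (exfalso; omega))
          | (simp_all <;> omega)
          | (simp_all <;> intros <;> (simp only [nlabs] at *) <;> split_ifs at * <;> first | rfl | omega | (exfalso; omega))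
    · have ep : |p.1 - t| = p.1 - t := abs_of_nonneg (by omega)
      have ep' : |t - p.1| = p.1 - t := by rw [abs_of_nonpos (by omega)]; ring
      simp only [nlStepA, nlStepB, nlLink, ge_iff_le, e1, e2, ep, ep']
      split_ifs <;>
        first
          | rfl | omega
          | (have h := hbt (by omega); subst h; simp_all <;> omega)
          | (have h := hat (by omega); subst h; simp_all <;> omega)
          | (intros; simp only [nlabs] at *; split_ifs at * <;> first | rfl | omega | (exfalso; omega))
          | (simp_all <;> omega)
          | (simp_all <;> intros <;> (simp only [nlabs] at *) <;> split_ifs at * <;> first | rfl | omega | (exfalso; omega))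

theorem nl_fold (t : Int) (l : List (Int × Int)) (b a : Option (Int × Int))
    (h : nlInv t b a) :
    l.foldl (nlStepB t) (nlLink t b a)
      = nlLink t (l.foldl (nlStepA t) (b, a)).1 (l.foldl (nlStepA t) (b, a)).2 := by
  induction l generalizing b a with
  | nil => rfl
  | cons p tl ih =>
      simp only [List.foldl_cons]
      rw [nl_link_step t b a p h]
      have heq : (nlStepA t (b, a) p) = ((nlStepA t (b, a) p).1, (nlStepA t (b, a) p).2) := rfl
      rw [heq]
      exact ih _ _ (nl_inv_step t b a p h)

-- the fold's below component is none iff no element is ≤ t (given it starts none); same for above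
theorem nl_fst_none (t : Int) (l : List (Int × Int)) (b a : Option (Int × Int)) :
    (l.foldl (nlStepA t) (b, a)).1 = none ↔ b = none ∧ ∀ p ∈ l, t < p.1 := by
  induction l generalizing b a with
  | nil => simp
  | cons p tl ih =>
      simp only [List.foldl_cons, List.mem_cons]
      have heq : (nlStepA t (b, a) p) = ((nlStepA t (b, a) p).1, (nlStepA t (b, a) p).2) := rfl
      rw [heq, ih]
      constructor
      · rintro ⟨hh1, hh2⟩
        rcases b with _ | bp
        · simp only [nlStepA] at hh1
          split_ifs at hh1 with hp
          refine ⟨rfl, fun q hq => ?_⟩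
          rcases hq with rfl | hq
          · omega
          · exact hh2 q hq
        · exfalso
          simp only [nlStepA] at hh1
          split_ifs at hh1 <;> simp_all
      · rintro ⟨hh1, hh2⟩
        have hp := hh2 p (Or.inl rfl)
        subst hh1
        constructor
        · simp only [nlStepA]
          rw [if_neg (by omega)]
        · exact fun q hq => hh2 q (Or.inr hq)

theorem nl_snd_none (t : Int) (l : List (Int × Int)) (b a : Option (Int × Int)) :
    (l.foldl (nlStepA t) (b, a)).2 = none ↔ a = none ∧ ∀ p ∈ l, p.1 < t := by
  induction l generalizing b a with
  | nil => simp
  | cons p tl ih =>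
      simp only [List.foldl_cons, List.mem_cons]
      have heq : (nlStepA t (b, a) p) = ((nlStepA t (b, a) p).1, (nlStepA t (b, a) p).2) := rfl
      rw [heq, ih]
      constructor
      · rintro ⟨hh1, hh2⟩
        rcases a with _ | ap
        · simp only [nlStepA] at hh1
          split_ifs at hh1 with hp
          refine ⟨rfl, fun q hq => ?_⟩
          rcases hq with rfl | hq
          · omega
          · exact hh2 q hq
        · exfalso
          simp only [nlStepA] at hh1
          split_ifs at hh1 <;> simp_all
      · rintro ⟨hh1, hh2⟩
        have hp := hh2 p (Or.inl rfl)
        subst hh1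
        constructor
        · simp only [nlStepA]
          rw [if_neg (by omega)]
        · exact fun q hq => hh2 q (Or.inr hq)

-- ===== VERDICT (by name: the statement is the Claim_ definition above) =====
theorem nearest_lambda_with_bracket_spec : Claim_equal_nearest_lambda_with_bracket := by
  intro pairs t _
  show nearest_lambda_with_bracket pairs t = nearest_lambda_with_bracket_alt pairs t
  unfold nearest_lambda_with_bracket nearest_lambda_with_bracket_alt
  have hstepA : (fun (st : Option (Int × Int) × Option (Int × Int)) p =>
      (if p.1 ≤ t then
          match st.1 with
          | none => some p
          | some b => if p.1 > b.1 then some p else some b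
        else st.1,
       if p.1 ≥ t then
          match st.2 with
          | none => some p
          | some a => if p.1 < a.1 then some p else some a
        else st.2)) = nlStepA t := rfl
  simp only [hstepA]
  have hmin : PySem.List.min2? pairs (fun p => |p.1 - t|)
      (fun p => if p.1 ≤ t then (0 : Int) else 1) = pairs.foldl (nlStepB t) none := by
    unfold PySem.List.min2?
    congr 1
    funext acc x
    cases acc <;> rfl
  have hinv : nlInv t none none := by
    refine ⟨?_, ?_, ?_, ?_⟩ <;> intro q hq <;> simp_all
  have hmain := nl_fold t pairs none none hinv
  have hlinknn : nlLink t none none = none := rfl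
  rw [hlinknn] at hmain
  rw [hmin, hmain]
  rcases hb : (pairs.foldl (nlStepA t) (none, none)).1 with _ | bp
  · -- no element ≤ t : B's second all() is true, both sides none
    have hn := (nl_fst_none t pairs none none).mp hb
    have hall : pairs.all (fun p => t < p.1) = true := by
      simp only [List.all_eq_true]; intro p hp; simpa using hn.2 p hp
    simp [hall]
  · rcases ha : (pairs.foldl (nlStepA t) (none, none)).2 with _ | ap
    · -- no element ≥ t : B's first all() is true, both sides none
      have hn := (nl_snd_none t pairs none none).mp ha
      have hall : pairs.all (fun p => p.1 < t) = true := by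
        simp only [List.all_eq_true]; intro p hp; simpa using hn.2 p hp
      simp [hall]
    · -- both brackets exist: both all() are false
      have hbf : ¬ (pairs.all (fun p => p.1 < t) = true) := by
        intro hall
        have h : (pairs.foldl (nlStepA t) (none, none)).2 = none := by
          rw [nl_snd_none]
          exact ⟨rfl, fun p hp => by simpa using (List.all_eq_true.mp hall) p hp⟩
        exact absurd (h.symm.trans ha) (by simp)
      have haf : ¬ (pairs.all (fun p => t < p.1) = true) := by
        intro hall
        have h : (pairs.foldl (nlStepA t) (none, none)).1 = none := by
          rw [nl_fst_none]
          exact ⟨rfl, fun p hp => by simpa using (List.all_eq_true.mp hall) p hp⟩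
        exact absurd (h.symm.trans hb) (by simp)
      have hcond : ((pairs.all fun p => decide (p.1 < t)) || pairs.all fun p => decide (t < p.1)) ≠ true := by
        intro hor
        cases hx : (pairs.all fun p => decide (p.1 < t)) with
        | true => exact hbf hx
        | false =>
            cases hy : (pairs.all fun p => decide (t < p.1)) with
            | true => exact haf hy
            | false => rw [hx, hy] at hor; simp at hor
      rw [if_neg hcond]
      simp only [nlLink]
      split_ifs <;> rfl
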